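-- pv_equiv track=rewrite | github.com/rajendarmuddasani/confluence_enhancer_ai | src/processors/concept_processor_enhanced.py | _generate_linear_connections
-- ===== SOURCE A (Python) =====
-- from typing import List, Dict, Any, Optional, Tuple
--
-- def _generate_linear_connections(steps: List[Dict[str, Any]]) -> List[Dict[str, Any]]:
--     """Generate linear connections between steps."""
--     connections = []
--
--     if not steps:
--         return connections
--
--     # Start to first step
--     connections.append({
--         'from': 'Start',
--         'to': 'Step1',
--         'label': ''
--     })
--
--     # Connect consecutive steps
--     for i in range(len(steps) - 1):
--         connections.append({
--             'from': f'Step{i+1}',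
--             'to': f'Step{i+2}',
--             'label': ''
--         })
--
--     # Last step to end
--     connections.append({
--         'from': f'Step{len(steps)}',
--         'to': 'End',
--         'label': ''
--     })
--
--     return connections
-- ===== SOURCE B (Python) =====
-- from typing import List, Dict, Any
--
-- def _generate_linear_connections(steps: List[Dict[str, Any]]) -> List[Dict[str, Any]]:
--     """Generate linear connections by structural recursion that threads the
--     previous node's name through the chain (no three-segment construction)."""
--     if not steps:
--         return []
--     return _chain('Start', 1, steps)
--
-- def _chain(prev, k, rest):
--     if not rest:
--         return [{'from': prev, 'to': 'End', 'label': ''}]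
--     cur = f'Step{k}'
--     return [{'from': prev, 'to': cur, 'label': ''}] + _chain(cur, k + 1, rest[1:])
-- ===== Notes on version B (the rewrite author's own statement) =====
-- stated objective: alternative
-- what changed: B replaces A's three special-cased segments (start edge, indexed middle loop, end edge) by a single structural recursion over the steps list that threads the previous node's name and the next step number, emitting one edge per call and the final edge to End at the base case.
import Mathlib
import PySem

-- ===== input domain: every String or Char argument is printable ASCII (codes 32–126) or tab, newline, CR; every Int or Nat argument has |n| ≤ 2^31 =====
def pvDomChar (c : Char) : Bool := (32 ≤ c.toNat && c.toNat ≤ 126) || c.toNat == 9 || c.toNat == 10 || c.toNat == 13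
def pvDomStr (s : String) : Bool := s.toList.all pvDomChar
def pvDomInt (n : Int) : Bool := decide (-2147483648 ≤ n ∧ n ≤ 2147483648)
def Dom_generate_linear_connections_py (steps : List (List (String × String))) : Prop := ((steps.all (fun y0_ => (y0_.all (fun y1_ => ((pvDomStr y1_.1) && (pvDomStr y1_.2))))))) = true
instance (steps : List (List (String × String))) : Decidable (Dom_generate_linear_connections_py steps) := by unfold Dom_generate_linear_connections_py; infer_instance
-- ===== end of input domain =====

-- B replaces A's three special-cased segments with one structural recursion over the
-- steps list threading the previous node name; same O(n) cost, different decomposition.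


-- ===== PORT A =====
-- literal transliteration of A: start edge, loop over range(len(steps)-1) appending, end edge
def generate_linear_connections_py (steps : List (List (String × String))) : List (List (String × String)) :=
  if steps = [] then []
  else
    let connections : List (List (String × String)) :=
      [[("from", "Start"), ("to", "Step1"), ("label", "")]]
    let connections :=
      (PySem.List.pyRange 0 ((steps.length : Int) - 1) 1).foldl
        (fun acc i =>
          acc ++ [[("from", "Step" ++ PySem.Int.toStr (i + 1)),
                   ("to", "Step" ++ PySem.Int.toStr (i + 2)),
                   ("label", "")]])
        connections
    connections ++ [[("from", "Step" ++ PySem.Int.toStr (steps.length : Int)),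
                     ("to", "End"), ("label", "")]]

-- ===== PORT B =====
-- B-side helper: transliteration of Source B's _chain (structural recursion over rest)
def pvChain (prev : String) (k : Int) (rest : List (List (String × String))) : List (List (String × String)) :=
  match rest with
  | [] => [[("from", prev), ("to", "End"), ("label", "")]]
  | _ :: tl =>
      let cur := "Step" ++ PySem.Int.toStr k
      [[("from", prev), ("to", cur), ("label", "")]] ++ pvChain cur (k + 1) tl

-- literal transliteration of B: empty guard, then _chain('Start', 1, steps)
def generate_linear_connections_py_alt (steps : List (List (String × String))) : List (List (String × String)) :=
  if steps = [] then [] else pvChain "Start" 1 steps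

-- ===== PRECONDITION & SPEC =====
def Spec_generate_linear_connections_py (steps : List (List (String × String))) (out : List (List (String × String))) : Prop := out = generate_linear_connections_py_alt steps
instance (steps : List (List (String × String))) (out : List (List (String × String))) : Decidable (Spec_generate_linear_connections_py steps out) := by unfold Spec_generate_linear_connections_py; infer_instance

-- ===== CLAIM (what is proved, stated in full; the proofs are below) =====
def Claim_equal_generate_linear_connections_py : Prop := ∀ (steps : List (List (String × String))), Dom_generate_linear_connections_py steps → Spec_generate_linear_connections_py steps (generate_linear_connections_py steps)

-- ===== LEMMAS AND PROOFS =====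

-- one connection record
def pvConn (a b : String) : List (String × String) := [("from", a), ("to", b), ("label", "")]

-- node name 'Step<k>'
def pvStep (k : Nat) : String := "Step" ++ PySem.Int.toStr (k : Int)

theorem pvRange_succ_eq (n : Nat) :
    List.range (n + 1) = 0 :: (List.range n).map (fun x => x + 1) := by
  rw [List.range_succ_eq_map]

-- foldl that appends one element per item is init ++ map
theorem pvFoldl_append_singleton {α β : Type} (g : α → β) :
    ∀ (l : List α) (init : List β),
      l.foldl (fun acc x => acc ++ [g x]) init = init ++ l.map g := by
  intro l
  induction l with
  | nil => intro init; simp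
  | cons x t ih => intro init; simp [List.foldl, ih]

-- closed form of B's recursion from node Step k onward
theorem pvChain_closed : ∀ (t : List (List (String × String))) (k : Nat),
    pvChain (pvStep k) ((k : Int) + 1) t
      = (List.range t.length).map (fun i => pvConn (pvStep (k + i)) (pvStep (k + i + 1)))
        ++ [pvConn (pvStep (k + t.length)) "End"] := by
  intro t
  induction t with
  | nil =>
      intro k
      simp [pvChain, pvConn]
  | cons x s ih =>
      intro k
      have hcur : ("Step" ++ PySem.Int.toStr ((k : Int) + 1)) = pvStep (k + 1) := by
        simp only [pvStep]; push_cast; rfl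
      have h1 : ((k : Int) + 1 + 1) = ((k + 1 : Nat) : Int) + 1 := by push_cast; ring
      calc pvChain (pvStep k) ((k : Int) + 1) (x :: s)
          = pvConn (pvStep k) (pvStep (k + 1))
              :: pvChain (pvStep (k + 1)) (((k + 1 : Nat) : Int) + 1) s := by
            simp only [pvChain, hcur, h1, pvConn, List.singleton_append]
        _ = pvConn (pvStep k) (pvStep (k + 1))
              :: ((List.range s.length).map
                    (fun i => pvConn (pvStep (k + 1 + i)) (pvStep (k + 1 + i + 1)))
                  ++ [pvConn (pvStep (k + 1 + s.length)) "End"]) := by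
            rw [ih (k + 1)]
        _ = (List.range (x :: s).length).map
              (fun i => pvConn (pvStep (k + i)) (pvStep (k + i + 1)))
            ++ [pvConn (pvStep (k + (x :: s).length)) "End"] := by
            simp only [List.length_cons]
            rw [pvRange_succ_eq, List.map_cons, List.map_map]
            simp only [Nat.add_zero, List.cons_append]
            have e3 : k + (s.length + 1) = k + 1 + s.length := by omega
            rw [e3]
            congr 2
            apply List.map_congr_left
            intro i _
            have e1 : k + (i + 1) = k + 1 + i := by omega
            simp only [Function.comp_apply, e1]

theorem generate_linear_connections_py_spec : Claim_equal_generate_linear_connections_py := by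
  unfold Claim_equal_generate_linear_connections_py
  intro steps _
  unfold Spec_generate_linear_connections_py
  unfold generate_linear_connections_py generate_linear_connections_py_alt
  rcases steps with _ | ⟨a, t⟩
  · simp
  · simp only [if_neg (List.cons_ne_nil a t)]
    set m := t.length with hm
    have hlen : (((a :: t).length : Nat) : Int) = (m : Int) + 1 := by simp [hm]
    -- B side: first call unfolds, rest by pvChain_closed with k = 1
    have hs1 : ("Step" ++ PySem.Int.toStr (1 : Int)) = pvStep 1 := by decide
    have h2 : (2 : Int) = ((1 : Nat) : Int) + 1 := by norm_num
    have hB : pvChain "Start" 1 (a :: t)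
        = pvConn "Start" (pvStep 1)
            :: ((List.range m).map (fun i => pvConn (pvStep (1 + i)) (pvStep (1 + i + 1)))
                ++ [pvConn (pvStep (1 + m)) "End"]) := by
      show [pvConn "Start" ("Step" ++ PySem.Int.toStr (1 : Int))]
            ++ pvChain ("Step" ++ PySem.Int.toStr (1 : Int)) (1 + 1) t = _
      rw [hs1]
      have : (1 + 1 : Int) = ((1 : Nat) : Int) + 1 := by norm_num
      rw [this, pvChain_closed t 1, ← hm]
      simp
    -- A side to the same canonical form
    have hrA : PySem.List.pyRange 0 (((a :: t).length : Int) - 1) 1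
        = (List.range m).map (fun (k : Nat) => (k : Int)) := by
      rw [hlen, PySem.List.pyRange_one]
      have h : ((m : Int) + 1 - 1 - 0).toNat = m := by omega
      rw [h]
      simp only [zero_add]
    have hA :
        (((PySem.List.pyRange 0 (((a :: t).length : Int) - 1) 1).foldl
            (fun acc i =>
              acc ++ [[("from", "Step" ++ PySem.Int.toStr (i + 1)),
                       ("to", "Step" ++ PySem.Int.toStr (i + 2)),
                       ("label", "")]])
            [[("from", "Start"), ("to", "Step1"), ("label", "")]])
          ++ [[("from", "Step" ++ PySem.Int.toStr ((a :: t).length : Int)),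
               ("to", "End"), ("label", "")]])
        = pvConn "Start" (pvStep 1)
            :: ((List.range m).map (fun i => pvConn (pvStep (1 + i)) (pvStep (1 + i + 1)))
                ++ [pvConn (pvStep (1 + m)) "End"]) := by
      rw [hrA, pvFoldl_append_singleton, List.map_map, hlen]
      have hmid : (List.range m).map ((fun i =>
            [("from", "Step" ++ PySem.Int.toStr (i + 1)),
             ("to", "Step" ++ PySem.Int.toStr (i + 2)),
             ("label", "")]) ∘ (fun (k : Nat) => (k : Int)))
          = (List.range m).map (fun i => pvConn (pvStep (1 + i)) (pvStep (1 + i + 1))) := by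
        apply List.map_congr_left
        intro k _
        simp only [Function.comp_apply, pvConn, pvStep]
        have e1 : ((k : Int) + 1) = (((1 + k : Nat) : Nat) : Int) := by push_cast; ring
        have e2 : ((k : Int) + 2) = (((1 + k + 1 : Nat) : Nat) : Int) := by push_cast; ring
        rw [e1, e2]
      have hend : ("Step" ++ PySem.Int.toStr ((m : Int) + 1)) = pvStep (1 + m) := by
        simp only [pvStep]
        have : ((m : Int) + 1) = (((1 + m : Nat) : Nat) : Int) := by push_cast; ring
        rw [this]
      have hstart : ("Step1" : String) = pvStep 1 := by decide
      rw [hmid, hend]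
      simp only [pvConn, hstart, List.cons_append, List.nil_append]
    rw [hA, hB]
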